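-- pv_equiv track=rewrite | github.com/gouwsxander/somewhat-square-sudoku | enumerate-by-divisor.py | check_box_constraints
-- ===== SOURCE A (Python) =====
-- def get_row_constraints() -> dict[int, tuple[int, str] | None]:
--     """
--     Get the constraints for each row.
--
--     Returns:
--         Dictionary mapping row index to (position, digit) constraints.
--         Row 4's constraint is None, representing no constraint.
--     """
--     return {
--         0: (7, '2'),
--         1: (8, '5'),
--         2: (1, '2'),
--         3: (2, '0'),
--         4: None,
--         5: (3, '2'),
--         6: (4, '0'),
--         7: (5, '2'),
--         8: (6, '5')
--     }
--
-- def get_box_constraints() -> dict[int, list[tuple[int, int, str]]]: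
--     """Returns box-related constraints derived from the row constraints.
--
--     Each constraint is represented as (row, col, digit) where:
--     - row and col are the position in the 9x9 grid, and
--     - digit is the required digit at that position.
--
--     Returns:
--         Dictionary mapping box numbers (0-8) to lists of constraints within that box.
--         Every box number (0-8) will have an entry, though some may have empty lists.
--     """
--     # Initialize all boxes with empty constraint lists
--     box_constraints = {i: [] for i in range(9)}
--
--     row_constraints = get_row_constraints()
--     for row, constraint in row_constraints.items():
--         if constraint is None:
--             continue
--         col, digit = constraint
--         # Calculate which box this position belongs to
--         box_num = (row // 3) * 3 + (col // 3)
--         box_constraints[box_num].append((row, col, digit))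
--
--     return box_constraints
--
-- def check_box_constraints(num: str, row: int) -> bool:
--     """Checks if a number violates any box constraints based on its row placement.
--
--     Args:
--         num: 9-digit string representing the number.
--         row: The row where this number would be placed (0-8).
--
--     Returns:
--         True if the number satisfies all box constraints for its row.
--     """
--     box_constraints = get_box_constraints()
--     box_row = row // 3  # Which horizontal third of the grid we're in (0, 1, or 2)
--
--     # Check each box that this row intersects with
--     for box_col in range(3):
--         box_num = box_row * 3 + box_col
--         box_start_col = box_col * 3
--
--         # Get the three digits from our number that would go in this box
--         box_section = set(num[box_start_col:box_start_col + 3])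
--
--         # Check if any required digits in this box appear in wrong positions
--         for r, c, digit in box_constraints[box_num]:
--             if r != row and digit in box_section:
--                 return False
--
--     return True
-- ===== SOURCE B (Python) =====
-- def get_row_constraints() -> dict[int, tuple[int, str] | None]:
--     return {
--         0: (7, '2'),
--         1: (8, '5'),
--         2: (1, '2'),
--         3: (2, '0'),
--         4: None,
--         5: (3, '2'),
--         6: (4, '0'),
--         7: (5, '2'),
--         8: (6, '5')
--     }
--
-- def check_box_constraints(num: str, row: int) -> bool:
--     """Single pass over the row constraints; no box-indexed dict is built."""
--     box_row = row // 3
--     for r, constraint in get_row_constraints().items():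
--         if constraint is None:
--             continue
--         col, digit = constraint
--         if r // 3 != box_row or r == row:
--             continue
--         box_col = col // 3
--         if digit in num[box_col * 3 : box_col * 3 + 3]:
--             return False
--     return True
-- ===== Notes on version B (the rewrite author's own statement) =====
-- stated objective: simpler
-- what changed: B drops get_box_constraints entirely: instead of building a box-indexed dict of constraint lists and scanning the three boxes of the row band, it makes one direct pass over the row constraints, filtering by band and row and testing the digit against the matching 3-char slice of num.
import Mathlib
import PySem

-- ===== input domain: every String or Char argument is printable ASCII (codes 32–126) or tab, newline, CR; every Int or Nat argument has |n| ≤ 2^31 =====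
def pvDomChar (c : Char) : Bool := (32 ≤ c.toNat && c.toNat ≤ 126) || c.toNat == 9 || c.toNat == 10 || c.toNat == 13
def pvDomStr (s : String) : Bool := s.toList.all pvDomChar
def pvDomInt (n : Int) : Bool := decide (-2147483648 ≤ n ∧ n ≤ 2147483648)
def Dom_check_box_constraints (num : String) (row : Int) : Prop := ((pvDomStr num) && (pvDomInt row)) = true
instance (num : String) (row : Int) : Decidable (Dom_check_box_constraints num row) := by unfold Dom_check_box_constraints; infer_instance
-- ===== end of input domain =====

-- B replaces A's box-indexed dict (built and then scanned box by box) with one direct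
-- pass over the row constraints; objective: simpler. Return values agree on 0 ≤ row ≤ 8.

-- ===== PORT A =====
def get_row_constraints : PySem.Dict Int (Option (Int × String)) :=
  PySem.Dict.ofList
    [(0, some (7, "2")), (1, some (8, "5")), (2, some (1, "2")), (3, some (2, "0")),
     (4, none), (5, some (3, "2")), (6, some (4, "0")), (7, some (5, "2")), (8, some (6, "5"))]

def get_box_constraints : PySem.Dict Int (List (Int × Int × String)) :=
  let box_constraints :=
    (PySem.List.pyRange 0 9 1).foldl
      (fun d i => d.insert i ([] : List (Int × Int × String))) PySem.Dict.empty
  get_row_constraints.items.foldl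
    (fun d p =>
      match p.2 with
      | none => d
      | some (col, digit) =>
          let box_num := (PySem.Int.floordiv p.1 3) * 3 + PySem.Int.floordiv col 3
          d.modify box_num [] (fun l => l ++ [(p.1, col, digit)]))
    box_constraints

def check_box_constraints (num : String) (row : Int) : Bool :=
  let box_constraints := get_box_constraints
  let box_row := PySem.Int.floordiv row 3
  !((PySem.List.pyRange 0 3 1).any (fun box_col =>
      let box_num := box_row * 3 + box_col
      let box_start_col := box_col * 3
      let box_section : PySem.Set String :=
        PySem.Set.ofList
          ((PySem.Str.slice num (some box_start_col) (some (box_start_col + 3))).toList.map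
            (fun c => String.ofList [c]))
      (box_constraints.getD box_num []).any (fun t =>
        t.1 != row && box_section.contains t.2.2)))

-- ===== PORT B =====
def check_box_constraints_alt (num : String) (row : Int) : Bool :=
  let box_row := PySem.Int.floordiv row 3
  !(get_row_constraints.items.any (fun p =>
      match p.2 with
      | none => false
      | some (col, digit) =>
          if PySem.Int.floordiv p.1 3 != box_row || p.1 == row then false
          else
            let box_col := PySem.Int.floordiv col 3
            PySem.Str.isIn digit
              (PySem.Str.slice num (some (box_col * 3)) (some (box_col * 3 + 3)))))

-- ===== PRECONDITION & SPEC =====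
-- Pre_ excludes rows outside 0..8: there A's box-number lookup misses the dict and raises KeyError.
def Pre_check_box_constraints (num : String) (row : Int) : Prop := 0 ≤ row ∧ row ≤ 8
instance (num : String) (row : Int) : Decidable (Pre_check_box_constraints num row) := by
  unfold Pre_check_box_constraints; infer_instance
def pvWitness_check_box_constraints : String × Int := ("483157629", 0)

def Spec_check_box_constraints (num : String) (row : Int) (out : Bool) : Prop :=
  out = check_box_constraints_alt num row
instance (num : String) (row : Int) (out : Bool) : Decidable (Spec_check_box_constraints num row out) := by
  unfold Spec_check_box_constraints; infer_instance

-- ===== CLAIM (what is proved, stated in full; the proofs are below) =====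
def Claim_equal_check_box_constraints : Prop := ∀ (num : String) (row : Int), Dom_check_box_constraints num row → Pre_check_box_constraints num row → Spec_check_box_constraints num row (check_box_constraints num row)

-- ===== LEMMAS AND PROOFS =====

lemma singleton_infix_iff (d : Char) (l : List Char) : [d] <:+: l ↔ d ∈ l := by
  constructor
  · intro h
    exact List.singleton_sublist.mp h.sublist
  · intro h
    obtain ⟨s, t, rfl⟩ := List.append_of_mem h
    exact ⟨s, t, by simp⟩

-- membership of the one-char digit in set(num[a:b]) (A's test) equals the substring test (B's test)
lemma bridgeGen (d : Char) (l : List Char) :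
    decide (∃ a ∈ l, String.ofList [a] = String.ofList [d]) = PySem.Chars.isIn [d] l := by
  by_cases h : d ∈ l
  · have hR : PySem.Chars.isIn [d] l = true := by
      rw [PySem.Chars.isIn_iff_infix]
      exact (singleton_infix_iff d l).mpr h
    rw [hR, decide_eq_true_iff]
    exact ⟨d, h, rfl⟩
  · have hR : PySem.Chars.isIn [d] l = false := by
      rw [Bool.eq_false_iff]
      intro hc
      rw [PySem.Chars.isIn_iff_infix] at hc
      exact h ((singleton_infix_iff d l).mp hc)
    rw [hR, decide_eq_false_iff_not]
    rintro ⟨a, ha, hae⟩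
    have h2 := congrArg String.toList hae
    simp only [String.toList_ofList] at h2
    exact h (List.singleton_injective h2 ▸ ha)

lemma bridge0 (l : List Char) : decide (∃ a ∈ l, String.ofList [a] = "0") = PySem.Chars.isIn "0".toList l := bridgeGen '0' l
lemma bridge2 (l : List Char) : decide (∃ a ∈ l, String.ofList [a] = "2") = PySem.Chars.isIn "2".toList l := bridgeGen '2' l
lemma bridge5 (l : List Char) : decide (∃ a ∈ l, String.ofList [a] = "5") = PySem.Chars.isIn "5".toList l := bridgeGen '5' l

-- ===== VERDICT (by name: the statement is the Claim_ definition above) =====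
set_option maxHeartbeats 4000000 in
theorem check_box_constraints_spec : Claim_equal_check_box_constraints := by
  intro num row _ hpre
  unfold Spec_check_box_constraints
  obtain ⟨h0, h8⟩ := hpre
  have hr3 : PySem.List.pyRange 0 3 1 = [0, 1, 2] := by decide
  have hitems : get_row_constraints.items =
      [(0, some (7, "2")), (1, some (8, "5")), (2, some (1, "2")), (3, some (2, "0")),
       (4, none), (5, some (3, "2")), (6, some (4, "0")), (7, some (5, "2")), (8, some (6, "5"))] := by decide
  have e0 : PySem.Dict.getD get_box_constraints 0 ([] : List (Int × Int × String)) = [(2, 1, "2")] := by decide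
  have e1 : PySem.Dict.getD get_box_constraints 1 ([] : List (Int × Int × String)) = [] := by decide
  have e2 : PySem.Dict.getD get_box_constraints 2 ([] : List (Int × Int × String)) = [(0, 7, "2"), (1, 8, "5")] := by decide
  have e3 : PySem.Dict.getD get_box_constraints 3 ([] : List (Int × Int × String)) = [(3, 2, "0")] := by decide
  have e4 : PySem.Dict.getD get_box_constraints 4 ([] : List (Int × Int × String)) = [(5, 3, "2")] := by decide
  have e5 : PySem.Dict.getD get_box_constraints 5 ([] : List (Int × Int × String)) = [] := by decide
  have e6 : PySem.Dict.getD get_box_constraints 6 ([] : List (Int × Int × String)) = [] := by decide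
  have e7 : PySem.Dict.getD get_box_constraints 7 ([] : List (Int × Int × String)) = [(6, 4, "0"), (7, 5, "2")] := by decide
  have e8 : PySem.Dict.getD get_box_constraints 8 ([] : List (Int × Int × String)) = [(8, 6, "5")] := by decide
  have hf0 : Int.fdiv 0 3 = 0 := by decide
  have hf1 : Int.fdiv 1 3 = 0 := by decide
  have hf2 : Int.fdiv 2 3 = 0 := by decide
  have hf3 : Int.fdiv 3 3 = 1 := by decide
  have hf4 : Int.fdiv 4 3 = 1 := by decide
  have hf5 : Int.fdiv 5 3 = 1 := by decide
  have hf6 : Int.fdiv 6 3 = 2 := by decide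
  have hf7 : Int.fdiv 7 3 = 2 := by decide
  have hf8 : Int.fdiv 8 3 = 2 := by decide
  interval_cases row <;>
    (simp only [check_box_constraints, check_box_constraints_alt, hr3, hitems]
     norm_num [List.any_cons, List.any_nil, bne, e0, e1, e2, e3, e4, e5, e6, e7, e8,
       hf0, hf1, hf2, hf3, hf4, hf5, hf6, hf7, hf8, bridge0, bridge2, bridge5]
     try simp [Bool.and_comm])
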